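-- pv_equiv track=rewrite | github.com/jamesben6688/coding | recursive/good_draw.py | generate_good_draw
-- ===== SOURCE A (Python) =====
-- def generate_good_draw(players):
--     n = len(players)
--     if n == 1:
--         return players
--
--     # 排序为了分最强 vs 最弱配对
--     players_sorted = sorted(players)
--     pairs = []
--     for i in range(n // 2):
--         pairs.append((players_sorted[i], players_sorted[n - 1 - i]))
--
--     # 从每对中任选一个作为胜者构建下一轮（这里只求任意一个）
--     next_round = [min(a, b) for a, b in pairs]
--     # 递归生成下一轮
--     rest = generate_good_draw(next_round)
--
--     # 把当前轮的配对重新组装为原始顺序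
--     draw = []
--     for winner in rest:
--         for a, b in pairs:
--             if winner == a or winner == b:
--                 draw.append(a)
--                 draw.append(b)
--                 break
--     return draw
-- ===== SOURCE B (Python) =====
-- def _first_match(pairs, w):
--     for a, b in pairs:
--         if w == a or w == b:
--             return [a, b]
--     return []
--
--
-- def generate_good_draw(players):
--     # bottom-up: collect each round's strongest-vs-weakest pairs, then unwind in reverse
--     levels = []
--     cur = players
--     while len(cur) > 1:
--         s = sorted(cur)
--         half = len(s) // 2
--         pairs = list(zip(s, reversed(s)))[:half]
--         levels.append(pairs)
--         cur = s[:half]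
--     rest = cur
--     for pairs in reversed(levels):
--         rest = [x for w in rest for x in _first_match(pairs, w)]
--     return rest
-- ===== Notes on version B (the rewrite author's own statement) =====
-- stated objective: alternative
-- what changed: Replaces A's top-down recursion with an iterative bottom-up pass that collects each round's strongest-vs-weakest pairs (built by zipping the sorted list with its reverse and taking the winners as the sorted prefix, instead of an index loop plus per-pair min) and then unwinds the collected levels in reverse to reconstruct the draw.
-- crash fix: On the empty list A raises RecursionError (it recurses on [] forever); B returns []. — e.g. on generate_good_draw([]): A raises RecursionError, B returns []
import Mathlib
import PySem

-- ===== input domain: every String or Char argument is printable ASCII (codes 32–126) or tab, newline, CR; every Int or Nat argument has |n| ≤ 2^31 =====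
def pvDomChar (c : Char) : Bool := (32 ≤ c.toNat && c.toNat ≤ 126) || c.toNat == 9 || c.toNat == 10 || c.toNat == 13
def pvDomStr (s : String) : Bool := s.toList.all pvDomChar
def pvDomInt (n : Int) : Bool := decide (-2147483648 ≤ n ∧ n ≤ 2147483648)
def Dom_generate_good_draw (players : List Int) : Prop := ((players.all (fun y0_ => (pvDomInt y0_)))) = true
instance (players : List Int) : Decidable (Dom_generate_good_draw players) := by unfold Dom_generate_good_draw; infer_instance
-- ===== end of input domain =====

-- B rebuilds the draw bottom-up (iterative level collection + reverse unwind, head/tail pairing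
-- by zip with the reversed sorted list) instead of A's top-down recursion; objective: alternative.

-- ===== PORT A =====
-- A-side helper: the pair-building loop ('for i in range(n // 2): pairs.append(...)'),
-- named so the termination proof of the recursion can cite its length.
def pvPairsA (s : List Int) (n : Int) : List (Int × Int) :=
  (PySem.List.pyRange 0 (PySem.Int.floordiv n 2) 1).foldl
    (fun acc i => acc ++ [(PySem.List.pyGetD s i 0, PySem.List.pyGetD s (n - 1 - i) 0)]) []
    -- indices i and n-1-i are always in range here, so pyGetD _ _ 0 is exact

theorem pvPairsA_eq_map (s : List Int) (n : Int) :
    pvPairsA s n = (PySem.List.pyRange 0 (PySem.Int.floordiv n 2) 1).map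
      (fun i => (PySem.List.pyGetD s i 0, PySem.List.pyGetD s (n - 1 - i) 0)) := by
  unfold pvPairsA
  rw [PySem.List.foldl_append_singleton_eq_map]
  exact List.nil_append _

theorem pvPairsA_length (s : List Int) (m : Nat) :
    (pvPairsA s (m : Int)).length = m / 2 := by
  rw [pvPairsA_eq_map]
  simp [PySem.List.length_pyRange_one]
  omega

def generate_good_draw (players : List Int) : List Int :=
  let n : Int := players.length
  if _h1 : n = 1 then players
  else if _h0 : players.length = 0 then []
    -- guard: on [] the Python recurses forever (RecursionError); excluded by Pre_
  else
    let s := PySem.List.sorted players (fun x => x) false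
    let pairs := pvPairsA s n
    let next_round := pairs.map (fun p => min p.1 p.2)
    let rest := generate_good_draw next_round
    rest.foldl (fun draw w =>
      match pairs.find? (fun p => w == p.1 || w == p.2) with
      | some (a, b) => draw ++ [a, b]
      | none => draw) []
termination_by players.length
decreasing_by
  simp only [List.length_map, pvPairsA_length]
  omega

-- ===== PORT B =====
theorem pvHalfNat (m : Nat) : PySem.Int.floordiv (m : Int) 2 = ((m / 2 : Nat) : Int) := by
  rw [PySem.Int.floordiv_eq_ediv_of_pos (by norm_num)]
  omega

-- B-side helper: first pair containing the winner, as [a, b] (Source B's _first_match)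
def pvFirstMatch (pairs : List (Int × Int)) (w : Int) : List Int :=
  match pairs.find? (fun p => w == p.1 || w == p.2) with
  | some (a, b) => [a, b]
  | none => []

-- B-side: the while loop collecting each round's pairs (tail recursion over the loop state)
def pvBuildLevels (levels : List (List (Int × Int))) (cur : List Int) :
    List (List (Int × Int)) × List Int :=
  if _h : 1 < cur.length then
    let s := PySem.List.sorted cur (fun x => x) false
    let half : Int := PySem.Int.floordiv (s.length : Int) 2
    let pairs := PySem.List.slice (s.zip s.reverse) none (some half)
    pvBuildLevels (levels ++ [pairs]) (PySem.List.slice s none (some half))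
  else (levels, cur)
termination_by cur.length
decreasing_by
  simp only [PySem.List.length_sorted, pvHalfNat, PySem.List.slice_to_natCast, List.length_take]
  omega

def generate_good_draw_alt (players : List Int) : List Int :=
  let p := pvBuildLevels [] players
  p.1.reverse.foldl (fun rest pairs => rest.flatMap (fun w => pvFirstMatch pairs w)) p.2

-- ===== PRECONDITION & SPEC =====
-- Pre_ excludes only the empty list, on which A recurses forever (RecursionError).
def Pre_generate_good_draw (players : List Int) : Prop := players ≠ []
instance (players : List Int) : Decidable (Pre_generate_good_draw players) := by
  unfold Pre_generate_good_draw; infer_instance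

def pvWitness_generate_good_draw : List Int := [3, 1, 2, 5]

-- On the empty list A raises RecursionError (unbounded recursion); B returns [].
def Raises_generate_good_draw (players : List Int) : Prop := players = []
instance (players : List Int) : Decidable (Raises_generate_good_draw players) := by
  unfold Raises_generate_good_draw; infer_instance

def pvRaiseWitness_generate_good_draw : List Int := []
def pvRaiseWitnessOut_generate_good_draw : List Int := []

def Spec_generate_good_draw (players : List Int) (out : List Int) : Prop :=
  out = generate_good_draw_alt players
instance (players : List Int) (out : List Int) : Decidable (Spec_generate_good_draw players out) := by
  unfold Spec_generate_good_draw; infer_instance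

-- ===== CLAIM (what is proved, stated in full; the proofs are below) =====
def Claim_equal_generate_good_draw : Prop := ∀ (players : List Int),
  Dom_generate_good_draw players → Pre_generate_good_draw players →
    Spec_generate_good_draw players (generate_good_draw players)

def Claim_raises_generate_good_draw : Prop :=
  (∀ (players : List Int), Dom_generate_good_draw players →
      Raises_generate_good_draw players → ¬ Pre_generate_good_draw players) ∧
  (Dom_generate_good_draw (pvRaiseWitness_generate_good_draw) ∧
    Raises_generate_good_draw (pvRaiseWitness_generate_good_draw) ∧
    generate_good_draw_alt (pvRaiseWitness_generate_good_draw) = pvRaiseWitnessOut_generate_good_draw)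

-- ===== LEMMAS AND PROOFS =====

theorem pvBL_stop (levels : List (List (Int × Int))) (cur : List Int) (h : ¬ 1 < cur.length) :
    pvBuildLevels levels cur = (levels, cur) := by
  rw [pvBuildLevels]
  simp [h]

theorem pvBL_step (levels : List (List (Int × Int))) (cur : List Int) (h : 1 < cur.length) :
    pvBuildLevels levels cur =
      pvBuildLevels
        (levels ++ [PySem.List.slice
            ((PySem.List.sorted cur (fun x => x) false).zip
              (PySem.List.sorted cur (fun x => x) false).reverse) none
            (some (PySem.Int.floordiv ((PySem.List.sorted cur (fun x => x) false).length : Int) 2))])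
        (PySem.List.slice (PySem.List.sorted cur (fun x => x) false) none
          (some (PySem.Int.floordiv ((PySem.List.sorted cur (fun x => x) false).length : Int) 2))) := by
  rw [pvBuildLevels]
  simp [h]

theorem pvNextLen (cur : List Int) (h : 1 < cur.length) :
    (PySem.List.slice (PySem.List.sorted cur (fun x => x) false) none
      (some (PySem.Int.floordiv ((PySem.List.sorted cur (fun x => x) false).length : Int) 2))).length
      = cur.length / 2 := by
  simp only [PySem.List.length_sorted, pvHalfNat, PySem.List.slice_to_natCast, List.length_take]
  omega


theorem pvBuildLevels_acc : ∀ (N : Nat) (cur : List Int), cur.length ≤ N →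
    ∀ (l1 l2 : List (List (Int × Int))),
      pvBuildLevels (l1 ++ l2) cur =
        (l1 ++ (pvBuildLevels l2 cur).1, (pvBuildLevels l2 cur).2) := by
  intro N
  induction N with
  | zero =>
    intro cur h l1 l2
    have hc : ¬ 1 < cur.length := by omega
    rw [pvBL_stop _ _ hc, pvBL_stop _ _ hc]
  | succ N ih =>
    intro cur h l1 l2
    by_cases hc : 1 < cur.length
    · rw [pvBL_step (l1 ++ l2) cur hc, pvBL_step l2 cur hc]
      have hlen := pvNextLen cur hc
      rw [List.append_assoc]
      exact ih _ (by omega) l1 _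
    · rw [pvBL_stop _ _ hc, pvBL_stop _ _ hc]

theorem pvBuildLevels_nilacc (cur : List Int) (levels : List (List (Int × Int))) :
    pvBuildLevels levels cur =
      (levels ++ (pvBuildLevels [] cur).1, (pvBuildLevels [] cur).2) := by
  have := pvBuildLevels_acc cur.length cur le_rfl levels []
  simpa using this
theorem pvPairsA_eq_zip (s : List Int) :
    pvPairsA s (s.length : Int) = (s.zip s.reverse).take (s.length / 2) := by
  rw [pvPairsA_eq_map]
  apply List.ext_getElem
  · simp [PySem.List.length_pyRange_one]
    omega
  · intro k h1 h2
    have hm : k < s.length / 2 := by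
      have := h1
      simp [PySem.List.length_pyRange_one] at this
      omega
    have hk : k < s.length := by omega
    have hk2 : s.length - 1 - k < s.length := by omega
    rw [List.getElem_take, List.getElem_zip, List.getElem_map,
      PySem.List.getElem_pyRange_one, List.getElem_reverse]
    have e1 : PySem.List.pyGetD s (0 + (k : Int)) 0 = s[k] := by
      rw [zero_add, PySem.List.pyGetD_natCast, List.getD_eq_getElem s 0 hk]
    have e2 : PySem.List.pyGetD s ((s.length : Int) - 1 - (0 + (k : Int))) 0
        = s[s.length - 1 - k] := by
      have hcast : ((s.length : Int) - 1 - (0 + (k : Int))) = ((s.length - 1 - k : Nat) : Int) := by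
        omega
      rw [hcast, PySem.List.pyGetD_natCast, List.getD_eq_getElem s 0 hk2]
    rw [e1, e2]

theorem pvWinners (s : List Int) (hp : s.Pairwise (fun a b => a ≤ b)) :
    ((s.zip s.reverse).take (s.length / 2)).map (fun p => min p.1 p.2)
      = s.take (s.length / 2) := by
  apply List.ext_getElem
  · simp
  · intro k h1 h2
    have hm : k < s.length / 2 := by
      have := h2
      simp at this
      omega
    have hk : k < s.length := by omega
    have hk2 : s.length - 1 - k < s.length := by omega
    rw [List.getElem_map, List.getElem_take, List.getElem_take, List.getElem_zip,
      List.getElem_reverse]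
    have hle : s[k] ≤ s[s.length - 1 - k] :=
      List.pairwise_iff_getElem.mp hp k (s.length - 1 - k) hk hk2 (by omega)
    simpa using min_eq_left hle

theorem pvRebuild (pairs : List (Int × Int)) (rest : List Int) :
    rest.foldl (fun draw w =>
      match pairs.find? (fun p => w == p.1 || w == p.2) with
      | some (a, b) => draw ++ [a, b]
      | none => draw) [] = rest.flatMap (fun w => pvFirstMatch pairs w) := by
  have h : (fun (draw : List Int) (w : Int) =>
      match pairs.find? (fun p => w == p.1 || w == p.2) with
      | some (a, b) => draw ++ [a, b]
      | none => draw) = fun draw w => draw ++ pvFirstMatch pairs w := by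
    funext draw w
    unfold pvFirstMatch
    cases hf : pairs.find? (fun p => w == p.1 || w == p.2) with
    | none => simp
    | some p => cases p; simp
  rw [h, PySem.List.foldl_append_eq_flatMap]
  simp
theorem pvA_one (players : List Int) (h : players.length = 1) :
    generate_good_draw players = players := by
  rw [generate_good_draw]
  simp [h]

theorem pvA_step (players : List Int) (h : 1 < players.length) :
    generate_good_draw players =
      (generate_good_draw
          ((pvPairsA (PySem.List.sorted players (fun x => x) false) (players.length : Int)).map
            (fun p => min p.1 p.2))).foldl
        (fun draw w =>
          match (pvPairsA (PySem.List.sorted players (fun x => x) false)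
              (players.length : Int)).find? (fun p => w == p.1 || w == p.2) with
          | some (a, b) => draw ++ [a, b]
          | none => draw) [] := by
  rw [generate_good_draw]
  rw [dif_neg (show ¬((players.length : Int) = 1) by omega)]
  rw [dif_neg (show ¬(players.length = 0) by omega)]

theorem pvAlt_def (players : List Int) :
    generate_good_draw_alt players =
      (pvBuildLevels [] players).1.reverse.foldl
        (fun rest pairs => rest.flatMap (fun w => pvFirstMatch pairs w))
        (pvBuildLevels [] players).2 := rfl
theorem pvMain : ∀ (N : Nat) (cur : List Int), cur.length ≤ N → 1 ≤ cur.length →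
    generate_good_draw cur = generate_good_draw_alt cur := by
  intro N
  induction N with
  | zero => intro cur h h1; omega
  | succ N ih =>
    intro cur h h1
    by_cases hc : 1 < cur.length
    · have hslen : (PySem.List.sorted cur (fun x => x) false).length = cur.length := by
        simp [PySem.List.length_sorted]
      have hpair : (PySem.List.sorted cur (fun x => x) false).Pairwise (fun a b => a ≤ b) := by
        simpa using PySem.List.sorted_pairwise cur (fun x => x)
      have hP : PySem.List.slice
            ((PySem.List.sorted cur (fun x => x) false).zip
              (PySem.List.sorted cur (fun x => x) false).reverse) none
            (some (PySem.Int.floordiv ((PySem.List.sorted cur (fun x => x) false).length : Int) 2))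
          = ((PySem.List.sorted cur (fun x => x) false).zip
              (PySem.List.sorted cur (fun x => x) false).reverse).take (cur.length / 2) := by
        rw [hslen, pvHalfNat, PySem.List.slice_to_natCast]
      have hnxt : PySem.List.slice (PySem.List.sorted cur (fun x => x) false) none
            (some (PySem.Int.floordiv ((PySem.List.sorted cur (fun x => x) false).length : Int) 2))
          = (PySem.List.sorted cur (fun x => x) false).take (cur.length / 2) := by
        rw [hslen, pvHalfNat, PySem.List.slice_to_natCast]
      have hPA : pvPairsA (PySem.List.sorted cur (fun x => x) false) (cur.length : Int)
          = ((PySem.List.sorted cur (fun x => x) false).zip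
              (PySem.List.sorted cur (fun x => x) false).reverse).take (cur.length / 2) := by
        have := pvPairsA_eq_zip (PySem.List.sorted cur (fun x => x) false)
        rw [hslen] at this
        exact this
      have hwin : (((PySem.List.sorted cur (fun x => x) false).zip
              (PySem.List.sorted cur (fun x => x) false).reverse).take (cur.length / 2)).map
            (fun p => min p.1 p.2)
          = (PySem.List.sorted cur (fun x => x) false).take (cur.length / 2) := by
        have := pvWinners (PySem.List.sorted cur (fun x => x) false) hpair
        rw [hslen] at this
        exact this
      have htlen : ((PySem.List.sorted cur (fun x => x) false).take (cur.length / 2)).length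
          = cur.length / 2 := by
        simp [hslen]
        omega
      -- A side
      rw [pvA_step cur hc, hPA, hwin, pvRebuild]
      -- B side
      rw [pvAlt_def, pvBL_step [] cur hc, List.nil_append, pvBuildLevels_nilacc, hP, hnxt]
      rw [List.reverse_append, List.foldl_append]
      have hrec : ((pvBuildLevels []
            ((PySem.List.sorted cur (fun x => x) false).take (cur.length / 2))).1.reverse.foldl
            (fun rest pairs => rest.flatMap (fun w => pvFirstMatch pairs w))
            (pvBuildLevels []
              ((PySem.List.sorted cur (fun x => x) false).take (cur.length / 2))).2)
          = generate_good_draw ((PySem.List.sorted cur (fun x => x) false).take (cur.length / 2)) := by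
        rw [← pvAlt_def]
        exact (ih _ (by omega) (by omega)).symm
      simp [hrec]
    · have hone : cur.length = 1 := by omega
      rw [pvA_one cur hone, pvAlt_def, pvBL_stop _ _ hc]
      simp

-- ===== VERDICT =====
theorem generate_good_draw_spec : Claim_equal_generate_good_draw := by
  intro players _ hpre
  unfold Spec_generate_good_draw
  exact pvMain players.length players le_rfl (by
    cases players with
    | nil => exact absurd rfl hpre
    | cons a t => simp)

@[simp] theorem generate_good_draw_raises : Claim_raises_generate_good_draw := by
  unfold Claim_raises_generate_good_draw
  refine ⟨fun players _ hr hpre => hpre hr, by decide, by decide, ?_⟩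
  show generate_good_draw_alt [] = []
  simp [generate_good_draw_alt, pvBuildLevels]
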